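-- pv_equiv track=rewrite | github.com/dmorrill10/pycolab | pycolab/examples/road.py | valid_meta_configurations
-- ===== SOURCE A (Python) =====
-- def valid_meta_configurations(
--     num_rows,
--     num_bumps,
--     num_pedestrians,
--     num_speeds
-- ):
--     assert num_rows > 1
--     num_rows_above_car = num_rows - 1
--     num_columns = 4
--     num_spaces = num_rows_above_car * num_columns
--     for speed in range(num_speeds):
--         for car_position in range(num_columns):
--             for num_present_bumps in range(num_bumps + 1):
--                 for num_present_pedestrians in range(num_pedestrians + 1):
--                     if (
--                         num_present_bumps + num_present_pedestrians <=
--                         num_spaces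
--                     ):
--                         yield (
--                             speed,
--                             car_position,
--                             num_present_bumps,
--                             num_present_pedestrians
--                         )
-- ===== SOURCE B (Python) =====
-- import itertools
--
--
-- def valid_meta_configurations(
--     num_rows,
--     num_bumps,
--     num_pedestrians,
--     num_speeds
-- ):
--     assert num_rows > 1
--     num_spaces = (num_rows - 1) * 4
--     if num_speeds <= 0:
--         return
--     # enumerate the valid (bumps, pedestrians) pairs directly: no guard test
--     valid_pairs = [
--         (b, p)
--         for b in range(min(num_bumps, num_spaces) + 1)
--         for p in range(min(num_pedestrians, num_spaces - b) + 1)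
--     ]
--     for speed, car_position, (b, p) in itertools.product(
--             range(num_speeds), range(4), valid_pairs):
--         yield (speed, car_position, b, p)
-- ===== Notes on version B (the rewrite author's own statement) =====
-- stated objective: alternative
-- what changed: B precomputes the valid (bumps,pedestrians) pairs as a table built from bounded ranges (min with num_spaces), eliminating the innermost guard test entirely, skips the table when there are no (speed,position) cells, and emits the output as an itertools.product cross product.
import Mathlib
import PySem

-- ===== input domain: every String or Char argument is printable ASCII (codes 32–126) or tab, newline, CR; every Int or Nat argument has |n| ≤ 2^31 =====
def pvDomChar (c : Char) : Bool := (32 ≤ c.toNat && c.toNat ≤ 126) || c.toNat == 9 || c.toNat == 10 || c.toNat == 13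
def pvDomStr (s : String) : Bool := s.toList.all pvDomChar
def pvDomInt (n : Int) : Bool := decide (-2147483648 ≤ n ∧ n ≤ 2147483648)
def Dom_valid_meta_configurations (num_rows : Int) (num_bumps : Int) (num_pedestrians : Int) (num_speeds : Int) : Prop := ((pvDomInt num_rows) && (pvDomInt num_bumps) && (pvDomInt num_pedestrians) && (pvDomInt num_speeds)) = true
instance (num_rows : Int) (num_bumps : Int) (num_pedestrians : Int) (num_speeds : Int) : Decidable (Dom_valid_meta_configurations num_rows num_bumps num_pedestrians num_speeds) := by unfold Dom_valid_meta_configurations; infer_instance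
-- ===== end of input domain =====

-- ===== PORT A =====
-- literal transliteration of A's generator: nested loops with the guard in the innermost loop
def valid_meta_configurations (num_rows : Int) (num_bumps : Int) (num_pedestrians : Int) (num_speeds : Int) : List (Int × Int × Int × Int) :=
  let num_rows_above_car := num_rows - 1
  let num_columns : Int := 4
  let num_spaces := num_rows_above_car * num_columns
  (PySem.List.pyRange 0 num_speeds 1).flatMap (fun speed =>
    (PySem.List.pyRange 0 num_columns 1).flatMap (fun car_position =>
      (PySem.List.pyRange 0 (num_bumps + 1) 1).flatMap (fun num_present_bumps =>
        (PySem.List.pyRange 0 (num_pedestrians + 1) 1).flatMap (fun num_present_pedestrians =>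
          if num_present_bumps + num_present_pedestrians ≤ num_spaces then
            [(speed, car_position, num_present_bumps, num_present_pedestrians)]
          else []))))

-- ===== PORT B =====
-- B: enumerate the valid (bumps, pedestrians) pairs directly with bounded ranges (no guard test),
-- skip the table when there is no (speed, position) cell, then cross-product
def valid_meta_configurations_alt (num_rows : Int) (num_bumps : Int) (num_pedestrians : Int) (num_speeds : Int) : List (Int × Int × Int × Int) :=
  let num_spaces := (num_rows - 1) * 4
  if num_speeds ≤ 0 then []
  else
    let valid_pairs :=
      (PySem.List.pyRange 0 (min num_bumps num_spaces + 1) 1).flatMap (fun b =>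
        (PySem.List.pyRange 0 (min num_pedestrians (num_spaces - b) + 1) 1).map (fun p => (b, p)))
    (PySem.List.pyRange 0 num_speeds 1).flatMap (fun speed =>
      (PySem.List.pyRange 0 4 1).flatMap (fun car_position =>
        valid_pairs.map (fun bp => (speed, car_position, bp.1, bp.2))))

-- ===== PRECONDITION & SPEC =====
-- A asserts num_rows > 1 (AssertionError otherwise); Pre_ excludes exactly those inputs.
def Pre_valid_meta_configurations (num_rows : Int) (num_bumps : Int) (num_pedestrians : Int) (num_speeds : Int) : Prop := num_rows > 1
instance (num_rows : Int) (num_bumps : Int) (num_pedestrians : Int) (num_speeds : Int) : Decidable (Pre_valid_meta_configurations num_rows num_bumps num_pedestrians num_speeds) := by unfold Pre_valid_meta_configurations; infer_instance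
def pvWitness_valid_meta_configurations : Int × Int × Int × Int := (3, 2, 2, 2)
def Spec_valid_meta_configurations (num_rows : Int) (num_bumps : Int) (num_pedestrians : Int) (num_speeds : Int) (out : List (Int × Int × Int × Int)) : Prop := out = valid_meta_configurations_alt num_rows num_bumps num_pedestrians num_speeds
instance (num_rows : Int) (num_bumps : Int) (num_pedestrians : Int) (num_speeds : Int) (out : List (Int × Int × Int × Int)) : Decidable (Spec_valid_meta_configurations num_rows num_bumps num_pedestrians num_speeds out) := by unfold Spec_valid_meta_configurations; infer_instance

-- ===== CLAIM (what is proved, stated in full; the proofs are below) =====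
def Claim_equal_valid_meta_configurations : Prop := ∀ (num_rows : Int) (num_bumps : Int) (num_pedestrians : Int) (num_speeds : Int), Dom_valid_meta_configurations num_rows num_bumps num_pedestrians num_speeds → Pre_valid_meta_configurations num_rows num_bumps num_pedestrians num_speeds → Spec_valid_meta_configurations num_rows num_bumps num_pedestrians num_speeds (valid_meta_configurations num_rows num_bumps num_pedestrians num_speeds)

-- ===== LEMMAS AND PROOFS =====
-- filtering 0..k-1 (as Ints) by ≤ m is the truncated range
theorem filter_range_le (k : Nat) (m : Int) :
    ((List.range k).map (fun (i : Nat) => (i : Int))).filter (fun p => p ≤ m)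
    = (List.range (min k (m + 1).toNat)).map (fun (i : Nat) => (i : Int)) := by
  induction k with
  | zero => simp
  | succ k ih =>
    rw [List.range_succ, List.map_append, List.filter_append, ih]
    by_cases h : (k : Int) ≤ m
    · have h1 : min k (m + 1).toNat = k := by omega
      have h2 : min (k + 1) (m + 1).toNat = k + 1 := by omega
      simp [h, h1, h2, List.range_succ]
    · have h1 : min (k + 1) (m + 1).toNat = min k (m + 1).toNat := by omega
      simp [h, h1]

-- the filtered pedestrian range is exactly the bounded range
theorem filter_pyRange_eq (np ns b : Int) :
    (PySem.List.pyRange 0 (np + 1) 1).filter (fun p => b + p ≤ ns)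
    = PySem.List.pyRange 0 (min np (ns - b) + 1) 1 := by
  rw [PySem.List.pyRange_one 0 (np + 1), PySem.List.pyRange_one 0 (min np (ns - b) + 1)]
  simp only [zero_add, Int.sub_zero]
  have hc : ∀ x ∈ (List.range (np + 1).toNat).map (fun (i : Nat) => (i : Int)),
      (decide (b + x ≤ ns)) = (decide (x ≤ ns - b)) := by
    intro x _; simp [decide_eq_decide]; omega
  rw [List.filter_congr hc, filter_range_le]
  have hmin : min (np + 1).toNat (ns - b + 1).toNat = (min np (ns - b) + 1).toNat := by omega
  rw [hmin]

theorem filter_map_eq (ns b s c : Int) (lp : List Int) :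
    lp.flatMap (fun p => if b + p ≤ ns then [(s, c, b, p)] else ([] : List (Int × Int × Int × Int)))
    = ((lp.filter (fun p => b + p ≤ ns)).map (fun p => (b, p))).map (fun bp => (s, c, bp.1, bp.2)) := by
  induction lp with
  | nil => simp
  | cons p lp ihp => by_cases h : b + p ≤ ns <;> simp [h, ihp]

-- the inner two loops of A produce exactly B's pairs table, tagged with (s, c)
theorem inner_pairs_eq (ns nb np : Int) (s c : Int) (hns : 0 ≤ ns) :
    (PySem.List.pyRange 0 (nb + 1) 1).flatMap (fun b => (PySem.List.pyRange 0 (np + 1) 1).flatMap (fun p =>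
      if b + p ≤ ns then [(s, c, b, p)] else ([] : List (Int × Int × Int × Int))))
    = ((PySem.List.pyRange 0 (min nb ns + 1) 1).flatMap (fun b =>
        (PySem.List.pyRange 0 (min np (ns - b) + 1) 1).map (fun p => (b, p)))).map
        (fun bp => (s, c, bp.1, bp.2)) := by
  have step : ∀ lb : List Int,
      lb.flatMap (fun b => (PySem.List.pyRange 0 (np + 1) 1).flatMap (fun p =>
        if b + p ≤ ns then [(s, c, b, p)] else ([] : List (Int × Int × Int × Int))))
      = (lb.flatMap (fun b =>
          (PySem.List.pyRange 0 (min np (ns - b) + 1) 1).map (fun p => (b, p)))).map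
          (fun bp => (s, c, bp.1, bp.2)) := by
    intro lb
    induction lb with
    | nil => simp
    | cons b lb ih =>
      rw [List.flatMap_cons, List.flatMap_cons, List.map_append, ih, filter_map_eq,
        filter_pyRange_eq]
  rw [step]
  by_cases hb : nb ≤ ns
  · rw [min_eq_left hb]
  · have hsplit : PySem.List.pyRange 0 (nb + 1) 1
        = PySem.List.pyRange 0 (ns + 1) 1 ++ PySem.List.pyRange (ns + 1) (nb + 1) 1 :=
      PySem.List.pyRange_one_append 0 (ns + 1) (nb + 1) (by omega) (by omega)
    have htail : (PySem.List.pyRange (ns + 1) (nb + 1) 1).flatMap (fun b =>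
        (PySem.List.pyRange 0 (min np (ns - b) + 1) 1).map (fun p => (b, p))) = [] := by
      rw [List.flatMap_eq_nil_iff]
      intro b hb'
      rw [PySem.List.mem_pyRange_one] at hb'
      rw [PySem.List.pyRange_one_eq_nil (by omega : min np (ns - b) + 1 ≤ 0)]
      simp
    rw [min_eq_right (le_of_not_ge hb), hsplit, List.flatMap_append, htail, List.append_nil]

-- ===== VERDICT (by name: the statement is the Claim_ definition above) =====
theorem valid_meta_configurations_spec : Claim_equal_valid_meta_configurations := by
  intro num_rows num_bumps num_pedestrians num_speeds _ hpre
  unfold Spec_valid_meta_configurations valid_meta_configurations valid_meta_configurations_alt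
  unfold Pre_valid_meta_configurations at hpre
  have hns : (0 : Int) ≤ (num_rows - 1) * 4 := by omega
  by_cases hs : num_speeds ≤ 0
  · simp [hs, PySem.List.pyRange_one_eq_nil hs]
  · simp only [if_neg hs]
    refine List.flatMap_congr (fun s _ => List.flatMap_congr (fun c _ => ?_))
    exact inner_pairs_eq _ _ _ s c hns
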